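-- pv_equiv track=rewrite | github.com/ablab/nerpa | src/nerpa_pipeline/splitter.py | split_by_one_orf_Starter_TE
-- ===== SOURCE A (Python) =====
-- def end_by_TE_TD(orf, orf_domains, orf_ori):
--     if orf_ori[orf] == '+' and (orf_domains[orf][-1] == "TE" or orf_domains[orf][-1] == "TD"):
--         return True
--     if orf_ori[orf] == '-' and (orf_domains[orf][0] == "TE" or orf_domains[orf][0] == "TD"):
--         return True
--     return False
--
-- def start_by_Starter(orf, orf_domains, orf_ori):
--     if orf_ori[orf] == '+' and (orf_domains[orf][0] == "C_Starter"):
--         return True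
--     if orf_ori[orf] == '-' and (orf_domains[orf][-1] == "C_Starter"):
--         return True
--     return False
--
-- def split_by_one_orf_Starter_TE(BGCs, orf_ori, orf_domains):
--     res_bgcs = []
--     for BGC in BGCs:
--         cur_i = 0
--         for i in range(len(BGC)):
--             orf = BGC[i]
--             if end_by_TE_TD(orf, orf_domains, orf_ori) and start_by_Starter(orf, orf_domains, orf_ori):
--                 if i != cur_i:
--                     res_bgcs.append(BGC[cur_i: i])
--                 res_bgcs.append([BGC[i]])
--                 cur_i = i + 1
--         if cur_i != len(BGC):
--             res_bgcs.append(BGC[cur_i: len(BGC)])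
--
--     return res_bgcs
-- ===== SOURCE B (Python) =====
-- def end_by_TE_TD(orf, orf_domains, orf_ori):
--     if orf_ori[orf] == '+' and (orf_domains[orf][-1] == "TE" or orf_domains[orf][-1] == "TD"):
--         return True
--     if orf_ori[orf] == '-' and (orf_domains[orf][0] == "TE" or orf_domains[orf][0] == "TD"):
--         return True
--     return False
--
-- def start_by_Starter(orf, orf_domains, orf_ori):
--     if orf_ori[orf] == '+' and (orf_domains[orf][0] == "C_Starter"):
--         return True
--     if orf_ori[orf] == '-' and (orf_domains[orf][-1] == "C_Starter"):
--         return True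
--     return False
--
-- def split_by_one_orf_Starter_TE(BGCs, orf_ori, orf_domains):
--     def is_splitter(orf):
--         return end_by_TE_TD(orf, orf_domains, orf_ori) and start_by_Starter(orf, orf_domains, orf_ori)
--
--     def split_one(bgc):
--         # repeatedly chop the list at its first self-contained ORF; no index cursor
--         out = []
--         while True:
--             i = next((k for k, orf in enumerate(bgc) if is_splitter(orf)), None)
--             if i is None:
--                 break
--             if i:
--                 out.append(bgc[:i])
--             out.append([bgc[i]])
--             bgc = bgc[i + 1:]
--         if bgc:
--             out.append(bgc)
--         return out
--
--     res_bgcs = []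
--     for bgc in BGCs:
--         res_bgcs.extend(split_one(bgc))
--     return res_bgcs
-- ===== Notes on version B (the rewrite author's own statement) =====
-- stated objective: alternative
-- what changed: B replaces A's single indexed scan with a running cursor by a search-and-chop loop: repeatedly find the first self-contained ORF in the remaining list, emit the head segment and the splitter, and rebind the list to the slice after it; no index bookkeeping against the original list.
import Mathlib
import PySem

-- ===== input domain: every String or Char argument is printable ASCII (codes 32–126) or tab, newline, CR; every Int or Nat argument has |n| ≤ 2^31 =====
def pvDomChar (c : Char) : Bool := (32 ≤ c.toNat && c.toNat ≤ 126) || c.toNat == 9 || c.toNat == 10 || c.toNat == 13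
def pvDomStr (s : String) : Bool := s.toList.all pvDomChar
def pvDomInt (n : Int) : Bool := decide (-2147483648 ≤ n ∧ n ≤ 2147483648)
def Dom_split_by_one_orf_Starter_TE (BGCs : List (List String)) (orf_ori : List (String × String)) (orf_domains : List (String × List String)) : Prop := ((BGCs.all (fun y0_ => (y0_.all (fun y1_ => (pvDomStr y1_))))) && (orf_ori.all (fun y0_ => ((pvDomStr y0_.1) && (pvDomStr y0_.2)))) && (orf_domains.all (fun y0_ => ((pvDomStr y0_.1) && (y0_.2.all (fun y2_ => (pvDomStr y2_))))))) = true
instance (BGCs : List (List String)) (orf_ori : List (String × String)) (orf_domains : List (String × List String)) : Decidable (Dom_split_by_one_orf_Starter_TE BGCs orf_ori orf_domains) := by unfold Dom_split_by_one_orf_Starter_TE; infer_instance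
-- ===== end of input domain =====

-- B replaces A's indexed scan with a cursor by a search-and-chop loop over a shrinking list; alternative decomposition, same cost; equal wherever A raises no exception.

-- ===== PORT A =====
-- shared module-level helpers of Source A / Source B; the dict lookups use .get?/.getD only on
-- inputs where Python would raise KeyError/IndexError — those are excluded by Pre_.
def end_by_TE_TD (orf : String) (orf_domains : List (String × List String)) (orf_ori : List (String × String)) : Bool :=
  let ori := (PySem.Dict.mk orf_ori).get? orf                -- orf_ori[orf]  (none = KeyError, outside Pre_)
  let ds := ((PySem.Dict.mk orf_domains).get? orf).getD []   -- orf_domains[orf]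
  if ori == some "+" && (PySem.List.pyGet? ds (-1) == some "TE" || PySem.List.pyGet? ds (-1) == some "TD") then true
  else if ori == some "-" && (PySem.List.pyGet? ds 0 == some "TE" || PySem.List.pyGet? ds 0 == some "TD") then true
  else false

def start_by_Starter (orf : String) (orf_domains : List (String × List String)) (orf_ori : List (String × String)) : Bool :=
  let ori := (PySem.Dict.mk orf_ori).get? orf
  let ds := ((PySem.Dict.mk orf_domains).get? orf).getD []
  if ori == some "+" && PySem.List.pyGet? ds 0 == some "C_Starter" then true
  else if ori == some "-" && PySem.List.pyGet? ds (-1) == some "C_Starter" then true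
  else false

def split_by_one_orf_Starter_TE (BGCs : List (List String)) (orf_ori : List (String × String)) (orf_domains : List (String × List String)) : List (List String) :=
  BGCs.foldl (fun res BGC =>
    let st := (PySem.List.enumerate BGC).foldl
      (fun (st : Int × List (List String)) iorf =>
        if end_by_TE_TD iorf.2 orf_domains orf_ori && start_by_Starter iorf.2 orf_domains orf_ori then
          (iorf.1 + 1,
           (if iorf.1 ≠ st.1 then st.2 ++ [PySem.List.slice BGC (some st.1) (some iorf.1)] else st.2) ++ [[iorf.2]])
        else st)
      ((0 : Int), res)
    if st.1 ≠ (BGC.length : Int) then st.2 ++ [PySem.List.slice BGC (some st.1) (some (BGC.length : Int))] else st.2) []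

-- ===== PORT B =====
-- split_one of Source B: chop the list at its first splitter, accumulate, continue on the tail slice
def splitOne (p : String → Bool) (bgc : List String) (out : List (List String)) : List (List String) :=
  match h : bgc.findIdx? p with
  | some i =>
      splitOne p (bgc.drop (i + 1)) ((if i = 0 then out else out ++ [bgc.take i]) ++ [[bgc[i]!]])
  | none => if bgc = [] then out else out ++ [bgc]
termination_by bgc.length
decreasing_by
  have hb : bgc ≠ [] := by rintro rfl; simp at h
  have : 0 < bgc.length := List.length_pos_iff.mpr hb
  simp only [List.length_drop]; omega

def split_by_one_orf_Starter_TE_alt (BGCs : List (List String)) (orf_ori : List (String × String)) (orf_domains : List (String × List String)) : List (List String) :=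
  BGCs.foldl (fun res BGC =>
    res ++ splitOne (fun orf => end_by_TE_TD orf orf_domains orf_ori && start_by_Starter orf orf_domains orf_ori) BGC []) []

-- ===== PRECONDITION & SPEC =====
-- Pre_ excludes exactly the inputs where Python A raises: an ORF missing from orf_ori (KeyError),
-- or an ORF whose orientation is '+'/'-' but which is missing from orf_domains (KeyError) or has
-- an empty domain list (IndexError).  B raises identically there.
def Pre_split_by_one_orf_Starter_TE (BGCs : List (List String)) (orf_ori : List (String × String)) (orf_domains : List (String × List String)) : Prop :=
  ∀ BGC ∈ BGCs, ∀ orf ∈ BGC,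
    ((PySem.Dict.mk orf_ori).get? orf).isSome = true ∧
    (((PySem.Dict.mk orf_ori).get? orf = some "+" ∨ (PySem.Dict.mk orf_ori).get? orf = some "-") →
      ((PySem.Dict.mk orf_domains).get? orf).isSome = true ∧ ((PySem.Dict.mk orf_domains).get? orf).getD ([] : List String) ≠ [])
instance (BGCs : List (List String)) (orf_ori : List (String × String)) (orf_domains : List (String × List String)) : Decidable (Pre_split_by_one_orf_Starter_TE BGCs orf_ori orf_domains) := by unfold Pre_split_by_one_orf_Starter_TE; infer_instance

def pvWitness_split_by_one_orf_Starter_TE : List (List String) × (List (String × String)) × (List (String × List String)) :=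
  ([["a", "b", "c"]],
   [("a", "+"), ("b", "+"), ("c", "-")],
   [("a", ["C_Starter", "TE"]), ("b", ["A"]), ("c", ["X"])])

def Spec_split_by_one_orf_Starter_TE (BGCs : List (List String)) (orf_ori : List (String × String)) (orf_domains : List (String × List String)) (out : List (List String)) : Prop := out = split_by_one_orf_Starter_TE_alt BGCs orf_ori orf_domains
instance (BGCs : List (List String)) (orf_ori : List (String × String)) (orf_domains : List (String × List String)) (out : List (List String)) : Decidable (Spec_split_by_one_orf_Starter_TE BGCs orf_ori orf_domains out) := by unfold Spec_split_by_one_orf_Starter_TE; infer_instance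

-- ===== CLAIM (what is proved, stated in full; the proofs are below) =====
def Claim_equal_split_by_one_orf_Starter_TE : Prop := ∀ (BGCs : List (List String)) (orf_ori : List (String × String)) (orf_domains : List (String × List String)), Dom_split_by_one_orf_Starter_TE BGCs orf_ori orf_domains → Pre_split_by_one_orf_Starter_TE BGCs orf_ori orf_domains → Spec_split_by_one_orf_Starter_TE BGCs orf_ori orf_domains (split_by_one_orf_Starter_TE BGCs orf_ori orf_domains)

-- ===== LEMMAS AND PROOFS =====

-- canonical segmentation: walks the list once carrying the pending splitter-free prefix
def segsFrom (p : String → Bool) : List String → List String → List (List String)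
  | pref, [] => if pref = [] then [] else [pref]
  | pref, x :: xs =>
      if p x then (if pref = [] then [] else [pref]) ++ ([x] :: segsFrom p [] xs)
      else segsFrom p (pref ++ [x]) xs

-- A's loop body and post-processing, named so the rewrites below are syntactic
def stepA (p : String → Bool) (BGC : List String) (st : Int × List (List String)) (iorf : Int × String) : Int × List (List String) :=
  if p iorf.2 then
    (iorf.1 + 1,
     (if iorf.1 ≠ st.1 then st.2 ++ [PySem.List.slice BGC (some st.1) (some iorf.1)] else st.2) ++ [[iorf.2]])
  else st

def finishA (BGC : List String) (st : Int × List (List String)) : List (List String) :=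
  if st.1 ≠ (BGC.length : Int) then st.2 ++ [PySem.List.slice BGC (some st.1) (some (BGC.length : Int))] else st.2

-- segsFrom characterised by the first splitter position
lemma segsFrom_eq_findIdx? (p : String → Bool) :
    ∀ (l : List String) (pref : List String),
      segsFrom p pref l =
        (match l.findIdx? p with
         | none => if pref ++ l = [] then [] else [pref ++ l]
         | some i => (if pref ++ l.take i = [] then [] else [pref ++ l.take i]) ++
             ([l[i]!] :: segsFrom p [] (l.drop (i + 1)))) := by
  intro l
  induction l with
  | nil => intro pref; simp [segsFrom]
  | cons x xs ih =>
    intro pref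
    by_cases hx : p x
    · simp [segsFrom, hx, List.findIdx?_cons]
    · simp only [segsFrom, hx, Bool.false_eq_true, if_false, List.findIdx?_cons]
      rw [ih (pref ++ [x])]
      cases hfi : xs.findIdx? p with
      | none => simp
      | some i => simp
-- B's chop loop computes the canonical segmentation
lemma splitOne_eq_segsFrom (p : String → Bool) :
    ∀ (n : Nat) (l : List String), l.length ≤ n → ∀ (out : List (List String)),
      splitOne p l out = out ++ segsFrom p [] l := by
  intro n
  induction n with
  | zero =>
    intro l hl out
    have : l = [] := List.length_eq_zero_iff.mp (Nat.le_zero.mp hl)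
    subst this
    rw [splitOne]
    simp [segsFrom]
  | succ n ih =>
    intro l hl out
    rw [splitOne]
    split
    · rename_i i hfi
      have hi : i < l.length := by
        have := List.findIdx?_eq_some_iff_findIdx_eq.mp hfi
        omega
      have hlen : (l.drop (i + 1)).length ≤ n := by
        simp only [List.length_drop]; omega
      rw [ih _ hlen]
      rw [segsFrom_eq_findIdx? p l []]
      have htake : (l.take i = []) ↔ (i = 0) := by
        rw [List.take_eq_nil_iff]
        constructor
        · rintro (h | h)
          · exact h
          · exact absurd h (by rintro rfl; simp at hi)
        · intro h; exact Or.inl h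
      by_cases h0 : i = 0
      · simp [hfi, h0]
      · simp [hfi, h0, htake]
    · rename_i hfi
      rw [segsFrom_eq_findIdx? p l []]
      by_cases hnil : l = [] <;> simp [hfi, hnil]

lemma stepA_app_true (p : String → Bool) (BGC : List String) (st : Int × List (List String))
    (j : Int) (x : String) (hx : p x = true) :
    stepA p BGC st (j, x) =
      (j + 1, (if j ≠ st.1 then st.2 ++ [PySem.List.slice BGC (some st.1) (some j)] else st.2) ++ [[x]]) := by
  simp [stepA, hx]

lemma stepA_app_false (p : String → Bool) (BGC : List String) (st : Int × List (List String))
    (j : Int) (x : String) (hx : p x = false) :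
    stepA p BGC st (j, x) = st := by
  simp [stepA, hx]

-- A's cursor loop over the enumerated suffix computes the canonical segmentation of the
-- suffix relative to the pending slice BGC[c:j]
lemma A_inner (p : String → Bool) (BGC : List String) :
    ∀ (tail : List String) (j c : Nat) (res : List (List String)),
      c ≤ j → c ≤ BGC.length → BGC.drop j = tail →
      finishA BGC (List.foldl (stepA p BGC) ((c : Int), res) (PySem.List.enumerate tail (j : Int)))
      = res ++ segsFrom p (PySem.List.slice BGC (some (c : Int)) (some (j : Int))) tail := by
  intro tail
  induction tail with
  | nil =>
    intro j c res hcj hcl hdrop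
    have hjlen : BGC.length ≤ j := by
      by_contra h
      have := List.drop_eq_nil_iff.mp hdrop
      omega
    simp only [PySem.List.enumerate_nil, List.foldl_nil]
    have h1 : PySem.List.slice BGC (some (c : Int)) (some (j : Int)) = BGC.drop c := by
      rw [PySem.List.slice_natCast]
      exact List.take_of_length_le (by simp; omega)
    have h2 : PySem.List.slice BGC (some (c : Int)) (some (BGC.length : Int)) = BGC.drop c := by
      rw [PySem.List.slice_natCast]
      exact List.take_of_length_le (by simp)
    by_cases hc : c = BGC.length
    · subst hc
      simp [finishA, segsFrom, h1, List.drop_of_length_le]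
    · have hne : ((c : Int)) ≠ (BGC.length : Int) := by exact_mod_cast hc
      have hdc : BGC.drop c ≠ [] := by
        rw [ne_eq, List.drop_eq_nil_iff]; omega
      simp [finishA, hne, h1, h2, segsFrom, hdc]
  | cons x xs ih =>
    intro j c res hcj hcl hdrop
    have hjlt : j < BGC.length := by
      by_contra h
      rw [List.drop_eq_nil_iff.mpr (by omega)] at hdrop
      exact absurd hdrop.symm (List.cons_ne_nil _ _)
    have hdropx : BGC.drop (j + 1) = xs := by
      have : BGC.drop (j + 1) = (BGC.drop j).drop 1 := by
        rw [List.drop_drop]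
      rw [this, hdrop]
      rfl
    have hgetj : BGC[j]? = some x := by
      have h0 : (BGC.drop j)[0]? = some x := by rw [hdrop]; rfl
      rw [List.getElem?_drop] at h0
      simpa using h0
    rw [PySem.List.enumerate_cons, List.foldl_cons]
    have hcast : ((j : Int)) + 1 = ((j + 1 : Nat) : Int) := by push_cast; ring
    by_cases hx : p x
    · -- splitter at absolute index j
      rw [stepA_app_true p BGC _ _ _ hx]
      rw [hcast]
      rw [ih (j + 1) (j + 1)
        ((if ((j : Int)) ≠ ((c : Int)) then res ++ [PySem.List.slice BGC (some (c : Int)) (some (j : Int))] else res) ++ [[x]])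
        (le_refl _) (by omega) hdropx]
      have hslice_self : PySem.List.slice BGC (some ((j + 1 : Nat) : Int)) (some ((j + 1 : Nat) : Int)) = [] := by
        rw [PySem.List.slice_natCast]; simp
      rw [hslice_self]
      rw [segsFrom]
      simp only [hx, if_true]
      have hsl : PySem.List.slice BGC (some (c : Int)) (some (j : Int)) = (BGC.drop c).take (j - c) :=
        PySem.List.slice_natCast ..
      have hemp : (PySem.List.slice BGC (some (c : Int)) (some (j : Int)) = []) ↔ (j = c) := by
        rw [hsl, List.take_eq_nil_iff, List.drop_eq_nil_iff]
        omega
      by_cases hjc : j = c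
      · have h1 : ¬ (((j : Int)) ≠ ((c : Int))) := by simp [hjc]
        simp [h1, hemp.mpr hjc]
      · have h1 : (((j : Int)) ≠ ((c : Int))) := by exact_mod_cast hjc
        have hne : PySem.List.slice BGC (some (c : Int)) (some (j : Int)) ≠ [] := fun h => hjc (hemp.mp h)
        simp [h1, hne]
    · -- not a splitter: extend the pending prefix
      rw [stepA_app_false p BGC _ _ _ (by simpa using hx)]
      rw [hcast, ih (j + 1) c res (by omega) hcl hdropx]
      rw [segsFrom]
      simp only [hx, Bool.false_eq_true, if_false]
      have hext : PySem.List.slice BGC (some (c : Int)) (some ((j + 1 : Nat) : Int)) =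
          PySem.List.slice BGC (some (c : Int)) (some (j : Int)) ++ [x] := by
        rw [PySem.List.slice_natCast, PySem.List.slice_natCast]
        have h1 : j + 1 - c = (j - c) + 1 := by omega
        rw [h1, List.take_succ]
        have h2 : (BGC.drop c)[j - c]? = some x := by
          rw [List.getElem?_drop]
          have h3 : c + (j - c) = j := by omega
          rw [h3, hgetj]
        simp [h2]
      rw [hext]

theorem pvWitness_ok :
    Dom_split_by_one_orf_Starter_TE pvWitness_split_by_one_orf_Starter_TE.1 pvWitness_split_by_one_orf_Starter_TE.2.1 pvWitness_split_by_one_orf_Starter_TE.2.2 ∧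
    Pre_split_by_one_orf_Starter_TE pvWitness_split_by_one_orf_Starter_TE.1 pvWitness_split_by_one_orf_Starter_TE.2.1 pvWitness_split_by_one_orf_Starter_TE.2.2 := by
  decide

-- ===== VERDICT (by name: the statement is the Claim_ definition above) =====
theorem split_by_one_orf_Starter_TE_spec : Claim_equal_split_by_one_orf_Starter_TE := by
  intro BGCs orf_ori orf_domains _ _
  unfold Spec_split_by_one_orf_Starter_TE split_by_one_orf_Starter_TE split_by_one_orf_Starter_TE_alt
  refine List.foldl_ext _ _ _ ?_
  intro res BGC _
  rw [splitOne_eq_segsFrom _ BGC.length BGC (le_refl _) [], List.nil_append]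
  have h := A_inner
    (fun orf => end_by_TE_TD orf orf_domains orf_ori && start_by_Starter orf orf_domains orf_ori)
    BGC BGC 0 0 res (le_refl _) (Nat.zero_le _) rfl
  have hsl0 : PySem.List.slice BGC (some ((0 : Nat) : Int)) (some ((0 : Nat) : Int)) = [] := by
    rw [PySem.List.slice_natCast]; simp
  rw [hsl0] at h
  exact h
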